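-- pv_equiv track=rewrite | github.com/sunnanxuan/MyLeetCode | 0936. Stamping The Sequence.py | movesToStamp
-- ===== SOURCE A (Python) =====
-- from typing import List
--
-- def movesToStamp(stamp: str, target: str) -> List[int]:
--     def matchstring(t):
--         for i in range(m - n + 1):
--             if all([c == "?" for c in t[i:i + n]]):
--                 continue
--             elif all([a == b or b == '?' for a, b in zip(stamp, t[i:])]):
--                 return i
--         return -1
--
--     res = []
--     m = len(target)
--     n = len(stamp)
--     while any([c != '?' for c in target]):
--         i = matchstring(target)
--         if i == -1: return []
--         res.append(i)
--         target = target[:i] + '?' * n + target[i + n:]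
--     return res[::-1]
-- ===== SOURCE B (Python) =====
-- import heapq
--
-- def movesToStamp(stamp, target):
--     m, n = len(target), len(stamp)
--     limit = m - n + 1 if n <= m else 0
--     t = list(target)
--     bad = [0] * limit            # bad[w]  = # positions in window w that mismatch stamp and are not '?'
--     nonq = [0] * limit           # nonq[w] = # positions in window w that are not '?'
--     heap = []                    # min-heap of (possibly stale) stampable window starts
--     for i in range(limit):
--         b = 0
--         q = 0
--         for j in range(n):
--             c = t[i + j]
--             if c != '?':
--                 if c != stamp[j]:
--                     b += 1
--                 q += 1
--         bad[i] = b
--         nonq[i] = q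
--         if b == 0 and q > 0:
--             heapq.heappush(heap, i)
--     remaining = sum(1 for c in t if c != '?')
--     res = []
--     while remaining > 0:
--         i = -1
--         while heap:
--             h = heapq.heappop(heap)
--             if bad[h] == 0 and nonq[h] > 0:    # still stampable (lazy deletion)
--                 i = h
--                 break
--         if i < 0:
--             return []
--         res.append(i)
--         for p in range(i, i + n):
--             c = t[p]
--             if c != '?':
--                 t[p] = '?'
--                 remaining -= 1
--                 lo = p + 1 - n if p + 1 >= n else 0
--                 hi = p if p < limit - 1 else limit - 1
--                 for w in range(lo, hi + 1):
--                     if c != stamp[p - w]: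
--                         bad[w] -= 1
--                     nonq[w] -= 1
--                     if bad[w] == 0 and nonq[w] > 0:
--                         heapq.heappush(heap, w)
--     res.reverse()
--     return res
-- ===== Notes on version B (the rewrite author's own statement) =====
-- stated objective: alternative
-- what changed: A rescans every window of the target from scratch (rebuilding slice lists) after each stamp; B precomputes per-window mismatch and non-'?' counters once, keeps a lazy min-heap of stampable window starts, and after each stamp updates only the <= n windows overlapping each cleared position, so the string is never rescanned; this trades A's repeated full scans for counter maintenance plus heap bookkeeping.
import Mathlib
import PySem

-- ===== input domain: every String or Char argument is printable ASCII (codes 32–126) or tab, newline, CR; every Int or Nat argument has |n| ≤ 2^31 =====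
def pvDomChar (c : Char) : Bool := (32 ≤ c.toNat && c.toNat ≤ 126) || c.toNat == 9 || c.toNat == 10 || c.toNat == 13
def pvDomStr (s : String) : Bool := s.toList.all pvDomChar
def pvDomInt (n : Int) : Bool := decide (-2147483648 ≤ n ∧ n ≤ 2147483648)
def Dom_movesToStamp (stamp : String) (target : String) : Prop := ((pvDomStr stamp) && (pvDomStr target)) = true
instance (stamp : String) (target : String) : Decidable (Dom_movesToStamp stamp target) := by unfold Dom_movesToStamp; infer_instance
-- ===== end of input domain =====

-- B replaces A's full rescan over all windows after every stamp by incrementally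
-- maintained per-window mismatch/non-'?' counters and a lazy min-heap of stampable
-- windows, updating only the windows that overlap each cleared position
-- (objective: alternative algorithm; return values proved equal on all inputs).

-- ===== PORT A =====
-- Python range(m - n + 1): empty when the bound is ≤ 0
def pvRangeA (m n : Nat) : List Nat := if n ≤ m then List.range (m - n + 1) else []

-- inner 'matchstring' of A, iterating over the indices of range(m - n + 1);
-- t[i:i+n] is (t.drop i).take n (indices are nonnegative and in range here)
def pvMatchAt (stamp t : List Char) (n : Nat) : List Nat → Int
  | [] => -1
  | i :: is =>
    if ((t.drop i).take n).all (fun c => c == '?') then pvMatchAt stamp t n is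
    else if (stamp.zip (t.drop i)).all (fun ab => ab.1 == ab.2 || ab.2 == '?') then (i : Int)
    else pvMatchAt stamp t n is

-- A's while loop; fuel m+1 is never exhausted (each stamp clears at least one non-'?')
def movesToStampLoop (stamp : List Char) (m n : Nat) : Nat → List Char → List Int → List Int
  | 0, _, _ => []
  | f+1, t, res =>
    if t.any (fun c => c != '?') then
      let i := pvMatchAt stamp t n (pvRangeA m n)
      if i == -1 then []
      else movesToStampLoop stamp m n f
            (t.take i.toNat ++ List.replicate n '?' ++ t.drop (i.toNat + n)) (res ++ [i])
    else res.reverse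

def movesToStamp (stamp : String) (target : String) : List Int :=
  movesToStampLoop stamp.toList target.length stamp.length (target.length + 1) target.toList []

-- ===== PORT B =====
-- Source B's init inner loop 'for j in range(n)': accumulates (b, q) for window i
def pvInitInner (stamp t : List Char) (i : Nat) : List Nat → Nat → Nat → Nat × Nat
  | [], b, q => (b, q)
  | j :: js, b, q =>
    let c := t.getD (i + j) '?'
    if c != '?' then
      if c != stamp.getD j '?' then pvInitInner stamp t i js (b+1) (q+1)
      else pvInitInner stamp t i js b (q+1)
    else pvInitInner stamp t i js b q

-- Source B's init loop 'for i in range(limit)'; heapq.heappush on a Nat heap is modelled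
-- by Mathlib's List.orderedInsert (the heap as its sorted list of elements)
def pvInit (stamp t : List Char) (n : Nat) :
    List Nat → List Nat × List Nat × List Nat → List Nat × List Nat × List Nat
  | [], st => st
  | i :: is, (bad, nonq, heap) =>
    let bq := pvInitInner stamp t i (List.range n) 0 0
    pvInit stamp t n is
      (bad.set i bq.1, nonq.set i bq.2,
       if bq.1 == 0 && decide (0 < bq.2) then List.orderedInsert (· ≤ ·) i heap else heap)

-- Source B's 'while heap: h = heappop(heap); if ok: break' lazy-deletion pop
def pvPop (bad nonq : List Nat) : List Nat → Option (Nat × List Nat)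
  | [] => none
  | h :: rest =>
    if bad.getD h 0 == 0 && decide (0 < nonq.getD h 0) then some (h, rest)
    else pvPop bad nonq rest

-- Source B's inner 'for w in range(lo, hi + 1)' neighbour update after clearing position p
def pvUpdW (stamp : List Char) (c : Char) (p : Nat) :
    List Nat → List Nat × List Nat × List Nat → List Nat × List Nat × List Nat
  | [], st => st
  | w :: ws, (bad, nonq, heap) =>
    let bad' := if c != stamp.getD (p - w) '?' then bad.set w (bad.getD w 0 - 1) else bad
    let nonq' := nonq.set w (nonq.getD w 0 - 1)
    pvUpdW stamp c p ws
      (bad', nonq',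
       if bad'.getD w 0 == 0 && decide (0 < nonq'.getD w 0) then
         List.orderedInsert (· ≤ ·) w heap
       else heap)

-- Source B's 'for p in range(i, i + n)' clearing loop
def pvUpdP (stamp : List Char) (n limit : Nat) :
    List Nat → List Char × List Nat × List Nat × List Nat × Nat →
    List Char × List Nat × List Nat × List Nat × Nat
  | [], st => st
  | p :: ps, (t, bad, nonq, heap, remaining) =>
    let c := t.getD p '?'
    if c != '?' then
      let lo := if n ≤ p + 1 then p + 1 - n else 0
      let hi := if p < limit - 1 then p else limit - 1
      let r := pvUpdW stamp c p (List.range' lo (hi + 1 - lo)) (bad, nonq, heap)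
      pvUpdP stamp n limit ps (t.set p '?', r.1, r.2.1, r.2.2, remaining - 1)
    else pvUpdP stamp n limit ps (t, bad, nonq, heap, remaining)

-- Source B's outer while loop (fuel m+1, never exhausted: each stamp clears ≥ 1 char)
def pvAltLoop (stamp : List Char) (n limit : Nat) :
    Nat → List Char → List Nat → List Nat → List Nat → Nat → List Int → List Int
  | 0, _, _, _, _, _, _ => []
  | f+1, t, bad, nonq, heap, remaining, res =>
    if 0 < remaining then
      match pvPop bad nonq heap with
      | none => []
      | some (i, rest) =>
        let st := pvUpdP stamp n limit (List.range' i n) (t, bad, nonq, rest, remaining)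
        pvAltLoop stamp n limit f st.1 st.2.1 st.2.2.1 st.2.2.2.1 st.2.2.2.2
          (res ++ [(i : Int)])
    else res.reverse

def movesToStamp_alt (stamp : String) (target : String) : List Int :=
  let m := target.length
  let n := stamp.length
  let limit := if n ≤ m then m - n + 1 else 0
  let ini := pvInit stamp.toList target.toList n (List.range limit)
              (List.replicate limit 0, List.replicate limit 0, [])
  pvAltLoop stamp.toList n limit (m + 1) target.toList ini.1 ini.2.1 ini.2.2
    (target.toList.countP (fun c => c != '?')) []

-- ===== PRECONDITION & SPEC =====
def Spec_movesToStamp (stamp : String) (target : String) (out : List Int) : Prop := out = movesToStamp_alt stamp target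
instance (stamp : String) (target : String) (out : List Int) : Decidable (Spec_movesToStamp stamp target out) := by unfold Spec_movesToStamp; infer_instance

-- ===== CLAIM (what is proved, stated in full; the proofs are below) =====
def Claim_equal_movesToStamp : Prop := ∀ (stamp : String) (target : String), Dom_movesToStamp stamp target → Spec_movesToStamp stamp target (movesToStamp stamp target)

-- ===== LEMMAS AND PROOFS =====

-- number of positions of window i that mismatch the stamp (and are not '?')
def badC (stamp t : List Char) (n i : Nat) : Nat :=
  (List.range n).countP
    (fun j => t.getD (i+j) '?' != '?' && t.getD (i+j) '?' != stamp.getD j '?')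

-- number of non-'?' positions of window i
def qC (t : List Char) (n i : Nat) : Nat :=
  (List.range n).countP (fun j => t.getD (i+j) '?' != '?')

-- "window i can be stamped now"
def Elig (stamp t : List Char) (n i : Nat) : Prop :=
  badC stamp t n i = 0 ∧ 0 < qC t n i

-- the string t with positions [i, p) replaced by '?'
def clearTo (t : List Char) (i p : Nat) : List Char :=
  t.take i ++ List.replicate (p - i) '?' ++ t.drop p

-- --- basic count characterisations ---

theorem badC_zero_iff (stamp t : List Char) (n i : Nat) :
    badC stamp t n i = 0 ↔
      ∀ j, j < n → t.getD (i+j) '?' = '?' ∨ t.getD (i+j) '?' = stamp.getD j '?' := by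
  unfold badC
  rw [List.countP_eq_zero]
  constructor
  · intro h j hj
    have := h j (List.mem_range.mpr hj)
    simp only [Bool.and_eq_true, bne_iff_ne, ne_eq, not_and, not_not] at this
    by_cases h1 : t.getD (i+j) '?' = '?'
    · exact Or.inl h1
    · exact Or.inr (this h1)
  · intro h j hj
    simp only [Bool.and_eq_true, bne_iff_ne, ne_eq, not_and, not_not]
    intro h1
    rcases h j (List.mem_range.mp hj) with h2 | h2
    · exact absurd h2 h1
    · exact h2

theorem qC_zero_iff (t : List Char) (n i : Nat) :
    qC t n i = 0 ↔ ∀ j, j < n → t.getD (i+j) '?' = '?' := by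
  unfold qC
  rw [List.countP_eq_zero]
  constructor
  · intro h j hj
    have := h j (List.mem_range.mpr hj)
    simp only [bne_iff_ne, ne_eq, not_not] at this
    exact this
  · intro h j hj
    simp only [bne_iff_ne, ne_eq, not_not]
    exact h j (List.mem_range.mp hj)

theorem qC_pos_iff (t : List Char) (n i : Nat) :
    0 < qC t n i ↔ ∃ j, j < n ∧ t.getD (i+j) '?' ≠ '?' := by
  unfold qC
  rw [List.countP_pos_iff]
  constructor
  · rintro ⟨j, hj, hp⟩
    exact ⟨j, List.mem_range.mp hj, by simpa using hp⟩
  · rintro ⟨j, hj, hp⟩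
    exact ⟨j, List.mem_range.mpr hj, by simpa using hp⟩

theorem badC_congr (stamp t1 t2 : List Char) (n i : Nat)
    (h : ∀ j, j < n → t1.getD (i+j) '?' = t2.getD (i+j) '?') :
    badC stamp t1 n i = badC stamp t2 n i := by
  unfold badC
  exact List.countP_congr (fun j hj => by rw [h j (List.mem_range.mp hj)])

theorem qC_congr (t1 t2 : List Char) (n i : Nat)
    (h : ∀ j, j < n → t1.getD (i+j) '?' = t2.getD (i+j) '?') :
    qC t1 n i = qC t2 n i := by
  unfold qC
  exact List.countP_congr (fun j hj => by rw [h j (List.mem_range.mp hj)])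

theorem elig_congr (stamp t1 t2 : List Char) (n i : Nat)
    (h : ∀ j, j < n → t1.getD (i+j) '?' = t2.getD (i+j) '?') :
    Elig stamp t1 n i ↔ Elig stamp t2 n i := by
  unfold Elig
  rw [badC_congr stamp t1 t2 n i h, qC_congr t1 t2 n i h]

-- --- counts after clearing one position ---

theorem countP_range_split (f : Nat → Bool) (n j0 : Nat) (h : j0 < n) :
    (List.range n).countP f =
      (List.range' 0 j0).countP f + (if f j0 then 1 else 0) +
        (List.range' (j0+1) (n-(j0+1))).countP f := by
  have e1 : n = j0 + (n - j0) := by omega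
  conv_lhs => rw [List.range_eq_range', e1, ← List.range'_append]
  have e2 : List.range' (0+1*j0) (n - j0) = j0 :: List.range' (j0+1) (n-(j0+1)) := by
    have e3 : 0+1*j0 = j0 := by omega
    have e4 : n - j0 = (n-(j0+1))+1 := by omega
    rw [e3, e4, List.range'_succ]
  rw [List.countP_append, e2, List.countP_cons]
  split_ifs <;> omega

theorem badC_set (stamp t : List Char) (n w p : Nat) (hp : p < t.length)
    (hw1 : w ≤ p) (hw2 : p < w + n) (hc : t.getD p '?' ≠ '?') :
    badC stamp (t.set p '?') n w =
      badC stamp t n w - (if t.getD p '?' != stamp.getD (p - w) '?' then 1 else 0) := by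
  unfold badC
  have hj0n : p - w < n := by omega
  have hwj0 : w + (p - w) = p := by omega
  rw [countP_range_split _ n (p - w) hj0n, countP_range_split _ n (p - w) hj0n]
  have hside : ∀ j, j ≠ p - w → (t.set p '?').getD (w+j) '?' = t.getD (w+j) '?' := by
    intro j hne
    have hpj : p ≠ w + j := by omega
    simp [List.getD_eq_getElem?_getD, List.getElem?_set_ne hpj]
  have c1 : (List.range' 0 (p-w)).countP
        (fun j => (t.set p '?').getD (w+j) '?' != '?' && (t.set p '?').getD (w+j) '?' != stamp.getD j '?') =
      (List.range' 0 (p-w)).countP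
        (fun j => t.getD (w+j) '?' != '?' && t.getD (w+j) '?' != stamp.getD j '?') :=
    List.countP_congr (fun j hj => by
      have hne : j ≠ p - w := by have := List.mem_range'_1.mp hj; omega
      rw [hside j hne])
  have c2 : (List.range' ((p-w)+1) (n-((p-w)+1))).countP
        (fun j => (t.set p '?').getD (w+j) '?' != '?' && (t.set p '?').getD (w+j) '?' != stamp.getD j '?') =
      (List.range' ((p-w)+1) (n-((p-w)+1))).countP
        (fun j => t.getD (w+j) '?' != '?' && t.getD (w+j) '?' != stamp.getD j '?') :=
    List.countP_congr (fun j hj => by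
      have hne : j ≠ p - w := by have := List.mem_range'_1.mp hj; omega
      rw [hside j hne])
  have hnew0 : (t.set p '?').getD (w+(p-w)) '?' = '?' := by
    rw [hwj0]
    simp [List.getD_eq_getElem?_getD, List.getElem?_set_self hp]
  rw [c1, c2]
  have emid_new : (if ((t.set p '?').getD (w+(p-w)) '?' != '?' && ((t.set p '?').getD (w+(p-w)) '?' != stamp.getD (p-w) '?')) then 1 else 0) = 0 := by
    simp only [hnew0, bne_self_eq_false, Bool.false_and, Bool.false_eq_true, if_false]
  have emid_old : (if (t.getD (w+(p-w)) '?' != '?' && (t.getD (w+(p-w)) '?' != stamp.getD (p-w) '?')) then 1 else 0) = (if t.getD p '?' != stamp.getD (p - w) '?' then 1 else 0) := by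
    rw [hwj0]
    have hcb : (t.getD p '?' != '?') = true := by simpa using hc
    simp only [hcb, Bool.true_and]
  rw [emid_new, emid_old]
  split_ifs <;> omega

theorem qC_set (t : List Char) (n w p : Nat) (hp : p < t.length)
    (hw1 : w ≤ p) (hw2 : p < w + n) (hc : t.getD p '?' ≠ '?') :
    qC (t.set p '?') n w = qC t n w - 1 := by
  unfold qC
  have hj0n : p - w < n := by omega
  have hwj0 : w + (p - w) = p := by omega
  rw [countP_range_split _ n (p - w) hj0n, countP_range_split _ n (p - w) hj0n]
  have hside : ∀ j, j ≠ p - w → (t.set p '?').getD (w+j) '?' = t.getD (w+j) '?' := by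
    intro j hne
    have hpj : p ≠ w + j := by omega
    simp [List.getD_eq_getElem?_getD, List.getElem?_set_ne hpj]
  have c1 : (List.range' 0 (p-w)).countP (fun j => (t.set p '?').getD (w+j) '?' != '?') =
      (List.range' 0 (p-w)).countP (fun j => t.getD (w+j) '?' != '?') :=
    List.countP_congr (fun j hj => by
      have hne : j ≠ p - w := by have := List.mem_range'_1.mp hj; omega
      rw [hside j hne])
  have c2 : (List.range' ((p-w)+1) (n-((p-w)+1))).countP
        (fun j => (t.set p '?').getD (w+j) '?' != '?') =
      (List.range' ((p-w)+1) (n-((p-w)+1))).countP (fun j => t.getD (w+j) '?' != '?') :=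
    List.countP_congr (fun j hj => by
      have hne : j ≠ p - w := by have := List.mem_range'_1.mp hj; omega
      rw [hside j hne])
  have hnew0 : (t.set p '?').getD (w+(p-w)) '?' = '?' := by
    rw [hwj0]
    simp [List.getD_eq_getElem?_getD, List.getElem?_set_self hp]
  rw [c1, c2]
  have emid_new : (if ((t.set p '?').getD (w+(p-w)) '?' != '?') then 1 else 0) = 0 := by
    simp only [hnew0, bne_self_eq_false, Bool.false_eq_true, if_false]
  have emid_old : (if (t.getD (w+(p-w)) '?' != '?') then 1 else 0) = 1 := by
    rw [hwj0]
    have hcb : (t.getD p '?' != '?') = true := by simpa using hc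
    simp only [hcb, if_true]
  rw [emid_new, emid_old]
  omega

theorem getD_set_out (t : List Char) (p : Nat) (n w : Nat)
    (hout : ¬ (w ≤ p ∧ p < w + n)) :
    ∀ j, j < n → (t.set p '?').getD (w+j) '?' = t.getD (w+j) '?' := by
  intro j hj
  have : p ≠ w + j := by omega
  simp [List.getD_eq_getElem?_getD, List.getElem?_set_ne this]

theorem countP_set_clear (t : List Char) (p : Nat) (hp : p < t.length)
    (hc : t.getD p '?' ≠ '?') :
    (t.set p '?').countP (fun c => c != '?') = t.countP (fun c => c != '?') - 1 := by
  rw [List.set_eq_take_append_cons_drop (l := t) (i := p), if_pos hp]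
  conv_rhs => rw [← List.take_append_drop p t, ← List.getElem_cons_drop hp]
  simp only [List.countP_append, List.countP_cons]
  have hg : t.getD p '?' = t[p] := by
    simp [List.getD_eq_getElem?_getD, List.getElem?_eq_getElem hp]
  rw [hg] at hc
  have : (t[p] != '?') = true := by simpa using hc
  simp [this]

-- --- clearTo: the partially cleared string ---

theorem clearTo_length (t : List Char) (i p : Nat) (hi : i ≤ p) (hp : p ≤ t.length) :
    (clearTo t i p).length = t.length := by
  simp [clearTo]
  omega

theorem clearTo_getElem? (t : List Char) (i p q : Nat) (hi : i ≤ p) (hp : p ≤ t.length) :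
    (clearTo t i p)[q]? = if i ≤ q ∧ q < p then some '?' else t[q]? := by
  unfold clearTo
  have hti : (t.take i).length = i := by simp; omega
  by_cases h1 : q < i
  · rw [if_neg (by omega)]
    rw [List.append_assoc, List.getElem?_append_left (by omega)]
    exact List.getElem?_take_of_lt h1
  · rw [List.append_assoc, List.getElem?_append_right (by omega)]
    by_cases h2 : q < p
    · rw [if_pos ⟨by omega, h2⟩]
      rw [List.getElem?_append_left (by simp; omega)]
      rw [hti]
      rw [List.getElem?_replicate]
      rw [if_pos (by omega)]
    · rw [if_neg (by omega)]
      rw [List.getElem?_append_right (by simp; omega)]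
      rw [hti]
      simp only [List.length_replicate, List.getElem?_drop]
      congr 1
      omega

theorem clearTo_getD (t : List Char) (i p q : Nat) (hi : i ≤ p) (hp : p ≤ t.length) :
    (clearTo t i p).getD q '?' = if i ≤ q ∧ q < p then '?' else t.getD q '?' := by
  simp only [List.getD_eq_getElem?_getD, clearTo_getElem? t i p q hi hp]
  split_ifs <;> simp

theorem clearTo_self (t : List Char) (i : Nat) : clearTo t i i = t := by
  simp [clearTo]

theorem clearTo_set (t : List Char) (i p : Nat) (hi : i ≤ p) (hp : p < t.length) :
    (clearTo t i p).set p '?' = clearTo t i (p+1) := by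
  apply List.ext_getElem?
  intro q
  by_cases hq : q = p
  · subst hq
    have hlt : q < (clearTo t i q).length := by rw [clearTo_length t i q hi (by omega)]; omega
    rw [List.getElem?_set_self hlt, clearTo_getElem? t i (q+1) q (by omega) (by omega)]
    rw [if_pos ⟨hi, by omega⟩]
  · rw [List.getElem?_set_ne (fun h => hq h.symm)]
    rw [clearTo_getElem? t i p q hi (by omega), clearTo_getElem? t i (p+1) q (by omega) (by omega)]
    by_cases h1 : i ≤ q ∧ q < p
    · rw [if_pos h1, if_pos ⟨h1.1, by omega⟩]
    · rw [if_neg h1, if_neg (by omega)]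

theorem clearTo_skip (t : List Char) (i p : Nat) (hi : i ≤ p) (hp : p < t.length)
    (hc : t.getD p '?' = '?') :
    clearTo t i p = clearTo t i (p+1) := by
  apply List.ext_getElem?
  intro q
  rw [clearTo_getElem? t i p q hi (by omega), clearTo_getElem? t i (p+1) q (by omega) (by omega)]
  by_cases h1 : i ≤ q ∧ q < p
  · rw [if_pos h1, if_pos ⟨h1.1, by omega⟩]
  · by_cases h2 : q = p
    · subst h2
      rw [if_neg h1, if_pos ⟨by omega, by omega⟩]
      rw [List.getD_eq_getElem?_getD, List.getElem?_eq_getElem hp] at hc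
      rw [List.getElem?_eq_getElem hp]
      simpa using hc
    · rw [if_neg h1, if_neg (by omega)]

-- --- init loop of B ---

theorem initInner_eq (stamp t : List Char) (i : Nat) :
    ∀ (js : List Nat) (b q : Nat),
      pvInitInner stamp t i js b q =
        (b + js.countP (fun j => t.getD (i+j) '?' != '?' && t.getD (i+j) '?' != stamp.getD j '?'),
         q + js.countP (fun j => t.getD (i+j) '?' != '?')) := by
  intro js
  induction js with
  | nil => intro b q; simp [pvInitInner]
  | cons j js ih =>
    intro b q
    simp only [pvInitInner, List.countP_cons]
    by_cases h1 : t.getD (i+j) '?' = '?'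
    · simp only [h1, bne_self_eq_false, Bool.false_and, Bool.false_eq_true, if_false]
      rw [ih b q, Prod.mk.injEq]
      constructor <;> omega
    · by_cases h2 : t.getD (i+j) '?' = stamp.getD j '?'
      · have e1 : (t.getD (i+j) '?' != '?') = true := by simpa using h1
        have e2 : (t.getD (i+j) '?' != stamp.getD j '?') = false := by simpa using h2
        simp only [e1, e2, Bool.true_and, if_true, Bool.false_eq_true, if_false]
        rw [ih b (q+1), Prod.mk.injEq]
        constructor <;> omega
      · have e1 : (t.getD (i+j) '?' != '?') = true := by simpa using h1
        have e2 : (t.getD (i+j) '?' != stamp.getD j '?') = true := by simpa using h2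
        simp only [e1, e2, Bool.true_and, if_true]
        rw [ih (b+1) (q+1), Prod.mk.injEq]
        constructor <;> omega

theorem init_spec (stamp t : List Char) (n limit : Nat) :
    ∀ (is : List Nat) (bad nonq heap : List Nat),
      bad.length = limit → nonq.length = limit →
      (∀ w ∈ is, w < limit) → is.Nodup →
      List.Pairwise (· ≤ ·) heap → (∀ x ∈ heap, x < limit) →
      (pvInit stamp t n is (bad, nonq, heap)).1.length = limit ∧
      (pvInit stamp t n is (bad, nonq, heap)).2.1.length = limit ∧
      (∀ v ∈ is, (pvInit stamp t n is (bad, nonq, heap)).1.getD v 0 = badC stamp t n v ∧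
                 (pvInit stamp t n is (bad, nonq, heap)).2.1.getD v 0 = qC t n v) ∧
      (∀ v, v ∉ is → (pvInit stamp t n is (bad, nonq, heap)).1.getD v 0 = bad.getD v 0 ∧
                     (pvInit stamp t n is (bad, nonq, heap)).2.1.getD v 0 = nonq.getD v 0) ∧
      List.Pairwise (· ≤ ·) (pvInit stamp t n is (bad, nonq, heap)).2.2 ∧
      (∀ x ∈ (pvInit stamp t n is (bad, nonq, heap)).2.2, x < limit) ∧
      (∀ x ∈ heap, x ∈ (pvInit stamp t n is (bad, nonq, heap)).2.2) ∧
      (∀ v ∈ is, Elig stamp t n v → v ∈ (pvInit stamp t n is (bad, nonq, heap)).2.2) := by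
  intro is
  induction is with
  | nil =>
    intro bad nonq heap hbl hql _ _ hs hbd
    exact ⟨hbl, hql, by simp, fun v _ => ⟨rfl, rfl⟩, hs, hbd, fun x hx => hx, by simp⟩
  | cons i is ih =>
    intro bad nonq heap hbl hql hlt hnd hs hbd
    have hilim : i < limit := hlt i (List.mem_cons_self)
    have hnotin : i ∉ is := (List.nodup_cons.mp hnd).1
    have hndtl : is.Nodup := (List.nodup_cons.mp hnd).2
    have hbq : pvInitInner stamp t i (List.range n) 0 0 = (badC stamp t n i, qC t n i) := by
      rw [initInner_eq]
      simp [badC, qC]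
    have hstep : pvInit stamp t n (i :: is) (bad, nonq, heap) =
        pvInit stamp t n is (bad.set i (badC stamp t n i), nonq.set i (qC t n i),
          if (badC stamp t n i == 0 && decide (0 < qC t n i)) then
            List.orderedInsert (· ≤ ·) i heap else heap) := by
      simp only [pvInit]
      rw [hbq]
    have hsub : ∀ x ∈ heap,
        x ∈ (if (badC stamp t n i == 0 && decide (0 < qC t n i)) then
          List.orderedInsert (· ≤ ·) i heap else heap) := by
      intro x hx
      split_ifs
      · exact (List.mem_orderedInsert _).mpr (Or.inr hx)
      · exact hx
    obtain ⟨L1, L2, Hin, Hout, HS, HB, HM, HE⟩ :=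
      ih (bad.set i (badC stamp t n i)) (nonq.set i (qC t n i))
        (if (badC stamp t n i == 0 && decide (0 < qC t n i)) then
          List.orderedInsert (· ≤ ·) i heap else heap)
        (by rw [List.length_set]; exact hbl)
        (by rw [List.length_set]; exact hql)
        (fun w hw => hlt w (List.mem_cons_of_mem _ hw)) hndtl
        (by split_ifs
            · exact List.Pairwise.orderedInsert i heap hs
            · exact hs)
        (by intro x hx
            split_ifs at hx
            · rcases (List.mem_orderedInsert _).mp hx with h | h
              · omega
              · exact hbd x h
            · exact hbd x hx)
    rw [hstep]
    refine ⟨L1, L2, ?_, ?_, HS, HB, ?_, ?_⟩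
    · intro v hv
      rcases List.mem_cons.mp hv with hv | hv
      · subst hv
        have e1 : (bad.set v (badC stamp t n v)).getD v 0 = badC stamp t n v := by
          simp [List.getD_eq_getElem?_getD,
            List.getElem?_set_self (show v < bad.length by omega)]
        have e2 : (nonq.set v (qC t n v)).getD v 0 = qC t n v := by
          simp [List.getD_eq_getElem?_getD,
            List.getElem?_set_self (show v < nonq.length by omega)]
        have := Hout v hnotin
        exact ⟨this.1.trans e1, this.2.trans e2⟩
      · exact Hin v hv
    · intro v hv
      have hvi : v ≠ i := fun h => hv (h ▸ List.mem_cons_self)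
      have hvis : v ∉ is := fun h => hv (List.mem_cons_of_mem _ h)
      have := Hout v hvis
      have e1 : (bad.set i (badC stamp t n i)).getD v 0 = bad.getD v 0 := by
        simp [List.getD_eq_getElem?_getD, List.getElem?_set_ne (fun h => hvi h.symm)]
      have e2 : (nonq.set i (qC t n i)).getD v 0 = nonq.getD v 0 := by
        simp [List.getD_eq_getElem?_getD, List.getElem?_set_ne (fun h => hvi h.symm)]
      exact ⟨this.1.trans e1, this.2.trans e2⟩
    · intro x hx
      exact HM x (hsub x hx)
    · intro v hv hE
      rcases List.mem_cons.mp hv with hv | hv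
      · subst hv
        have hcond : (badC stamp t n v == 0 && decide (0 < qC t n v)) = true := by
          simp [hE.1, hE.2]
        apply HM
        rw [hcond, if_pos rfl]
        exact (List.mem_orderedInsert _).mpr (Or.inl rfl)
      · exact HE v hv hE

-- --- pop loop of B ---

theorem pop_spec (stamp t : List Char) (n limit : Nat) (bad nonq : List Nat)
    (hb : ∀ v, v < limit → bad.getD v 0 = badC stamp t n v)
    (hq : ∀ v, v < limit → nonq.getD v 0 = qC t n v) :
    ∀ (heap : List Nat), List.Pairwise (· ≤ ·) heap → (∀ x ∈ heap, x < limit) →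
      (∀ v, v < limit → Elig stamp t n v → v ∈ heap) →
      (pvPop bad nonq heap = none → ∀ v, v < limit → ¬ Elig stamp t n v) ∧
      (∀ i rest, pvPop bad nonq heap = some (i, rest) →
        i < limit ∧ Elig stamp t n i ∧
        (∀ e, e < limit → Elig stamp t n e → i ≤ e) ∧
        (∀ e, e < limit → Elig stamp t n e → e ≠ i → e ∈ rest) ∧
        List.Pairwise (· ≤ ·) rest ∧ (∀ x ∈ rest, x < limit)) := by
  intro heap
  induction heap with
  | nil =>
    intro _ _ hcont
    refine ⟨fun _ v hv hE => (List.not_mem_nil (hcont v hv hE) : False), ?_⟩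
    intro i rest hsome
    simp [pvPop] at hsome
  | cons h rest' ih =>
    intro hs hbd hcont
    have hlim : h < limit := hbd h (List.mem_cons_self)
    have htest : (bad.getD h 0 == 0 && decide (0 < nonq.getD h 0)) = true ↔
        Elig stamp t n h := by
      rw [hb h hlim, hq h hlim]
      simp [Elig]
    by_cases hE : Elig stamp t n h
    · have hcondT : (bad.getD h 0 == 0 && decide (0 < nonq.getD h 0)) = true := htest.mpr hE
      refine ⟨?_, ?_⟩
      · intro heq
        have hred : pvPop bad nonq (h :: rest') = some (h, rest') := by
          simp only [pvPop, hcondT, if_true]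
        rw [hred] at heq
        exact absurd heq (by simp)
      · intro i rest hsome
        simp only [pvPop, hcondT, if_true] at hsome
        obtain ⟨rfl, rfl⟩ : h = i ∧ rest' = rest := by
          constructor <;> [exact (Prod.mk.injEq _ _ _ _ ▸ Option.some.inj hsome).1;
            exact (Prod.mk.injEq _ _ _ _ ▸ Option.some.inj hsome).2]
        refine ⟨hlim, hE, ?_, ?_, hs.of_cons, fun x hx => hbd x (List.mem_cons_of_mem _ hx)⟩
        · intro e he hEe
          rcases List.mem_cons.mp (hcont e he hEe) with h1 | h1
          · omega
          · exact List.rel_of_pairwise_cons hs h1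
        · intro e he hEe hne
          rcases List.mem_cons.mp (hcont e he hEe) with h1 | h1
          · exact absurd h1 hne
          · exact h1
    · have hcondF : (bad.getD h 0 == 0 && decide (0 < nonq.getD h 0)) = false := by
        rcases Bool.eq_false_or_eq_true (bad.getD h 0 == 0 && decide (0 < nonq.getD h 0)) with
          h1 | h1
        · exact absurd (htest.mp h1) hE
        · exact h1
      have hstep : pvPop bad nonq (h :: rest') = pvPop bad nonq rest' := by
        simp only [pvPop, hcondF, Bool.false_eq_true, if_false]
      rw [hstep]
      exact ih hs.of_cons (fun x hx => hbd x (List.mem_cons_of_mem _ hx))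
        (fun v hv hEv => by
          rcases List.mem_cons.mp (hcont v hv hEv) with h1 | h1
          · exact absurd (h1 ▸ hEv) hE
          · exact h1)

-- --- neighbour update loops of B ---

theorem updW_spec (stamp told : List Char) (n limit p : Nat) (hp : p < told.length)
    (hc : told.getD p '?' ≠ '?') :
    ∀ (ws : List Nat) (bad nonq heap : List Nat),
      bad.length = limit → nonq.length = limit →
      (∀ w ∈ ws, w ≤ p ∧ p < w + n ∧ w < limit) → ws.Nodup →
      (pvUpdW stamp (told.getD p '?') p ws (bad, nonq, heap)).1.length = limit ∧
      (pvUpdW stamp (told.getD p '?') p ws (bad, nonq, heap)).2.1.length = limit ∧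
      (∀ v, v ∉ ws →
        (pvUpdW stamp (told.getD p '?') p ws (bad, nonq, heap)).1.getD v 0 = bad.getD v 0 ∧
        (pvUpdW stamp (told.getD p '?') p ws (bad, nonq, heap)).2.1.getD v 0 = nonq.getD v 0) ∧
      (∀ v ∈ ws, bad.getD v 0 = badC stamp told n v → nonq.getD v 0 = qC told n v →
        (pvUpdW stamp (told.getD p '?') p ws (bad, nonq, heap)).1.getD v 0 =
          badC stamp (told.set p '?') n v ∧
        (pvUpdW stamp (told.getD p '?') p ws (bad, nonq, heap)).2.1.getD v 0 =
          qC (told.set p '?') n v) ∧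
      (∀ x ∈ heap, x ∈ (pvUpdW stamp (told.getD p '?') p ws (bad, nonq, heap)).2.2) ∧
      (List.Pairwise (· ≤ ·) heap →
        List.Pairwise (· ≤ ·) (pvUpdW stamp (told.getD p '?') p ws (bad, nonq, heap)).2.2) ∧
      (∀ x ∈ (pvUpdW stamp (told.getD p '?') p ws (bad, nonq, heap)).2.2, x ∈ heap ∨ x ∈ ws) ∧
      (∀ v ∈ ws, bad.getD v 0 = badC stamp told n v → nonq.getD v 0 = qC told n v →
        Elig stamp (told.set p '?') n v →
        v ∈ (pvUpdW stamp (told.getD p '?') p ws (bad, nonq, heap)).2.2) := by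
  intro ws
  induction ws with
  | nil =>
    intro bad nonq heap hbl hql _ _
    exact ⟨hbl, hql, fun v _ => ⟨rfl, rfl⟩, by simp, fun x hx => hx, fun h => h,
      fun x hx => Or.inl hx, by simp⟩
  | cons w ws ih =>
    intro bad nonq heap hbl hql hws hnd
    obtain ⟨hw1, hw2, hw3⟩ := hws w (List.mem_cons_self)
    have hnotin : w ∉ ws := (List.nodup_cons.mp hnd).1
    have hndtl : ws.Nodup := (List.nodup_cons.mp hnd).2
    set bad1 := (if told.getD p '?' != stamp.getD (p - w) '?' then
        bad.set w (bad.getD w 0 - 1) else bad) with hbad1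
    set nonq1 := nonq.set w (nonq.getD w 0 - 1) with hnonq1
    set heap1 := (if bad1.getD w 0 == 0 && decide (0 < nonq1.getD w 0) then
        List.orderedInsert (· ≤ ·) w heap else heap) with hheap1
    have hstep : pvUpdW stamp (told.getD p '?') p (w :: ws) (bad, nonq, heap) =
        pvUpdW stamp (told.getD p '?') p ws (bad1, nonq1, heap1) := by
      simp only [pvUpdW, hbad1, hnonq1, hheap1]
    have hbl1 : bad1.length = limit := by
      rw [hbad1]; split_ifs <;> simp [hbl]
    have hql1 : nonq1.length = limit := by rw [hnonq1]; simp [hql]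
    -- getD of the updated arrays at w and away from w
    have hbad1w : bad1.getD w 0 =
        bad.getD w 0 - (if told.getD p '?' != stamp.getD (p - w) '?' then 1 else 0) := by
      rw [hbad1]
      split_ifs
      · simp [List.getD_eq_getElem?_getD,
          List.getElem?_set_self (show w < bad.length by omega)]
      · simp
    have hnonq1w : nonq1.getD w 0 = nonq.getD w 0 - 1 := by
      rw [hnonq1]
      simp [List.getD_eq_getElem?_getD,
        List.getElem?_set_self (show w < nonq.length by omega)]
    have hbad1v : ∀ v, v ≠ w → bad1.getD v 0 = bad.getD v 0 := by
      intro v hv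
      rw [hbad1]
      split_ifs
      · simp [List.getD_eq_getElem?_getD, List.getElem?_set_ne (fun h => hv h.symm)]
      · rfl
    have hnonq1v : ∀ v, v ≠ w → nonq1.getD v 0 = nonq.getD v 0 := by
      intro v hv
      rw [hnonq1]
      simp [List.getD_eq_getElem?_getD, List.getElem?_set_ne (fun h => hv h.symm)]
    have hheap1sub : ∀ x ∈ heap, x ∈ heap1 := by
      intro x hx
      rw [hheap1]
      split_ifs
      · exact (List.mem_orderedInsert _).mpr (Or.inr hx)
      · exact hx
    have hheap1mem : ∀ x ∈ heap1, x ∈ heap ∨ x = w := by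
      intro x hx
      rw [hheap1] at hx
      split_ifs at hx
      · rcases (List.mem_orderedInsert _).mp hx with h | h
        · exact Or.inr h
        · exact Or.inl h
      · exact Or.inl hx
    -- A window whose counters were correct gets the correct new counters
    have hcorrw : bad.getD w 0 = badC stamp told n w → nonq.getD w 0 = qC told n w →
        bad1.getD w 0 = badC stamp (told.set p '?') n w ∧
        nonq1.getD w 0 = qC (told.set p '?') n w := by
      intro hbw hqw
      constructor
      · rw [hbad1w, hbw, badC_set stamp told n w p hp hw1 hw2 hc]
      · rw [hnonq1w, hqw, qC_set told n w p hp hw1 hw2 hc]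
    obtain ⟨L1, L2, Hout, Hin, HM, HS, HP, HE⟩ :=
      ih bad1 nonq1 heap1 hbl1 hql1
        (fun v hv => hws v (List.mem_cons_of_mem _ hv)) hndtl
    rw [hstep]
    refine ⟨L1, L2, ?_, ?_, ?_, ?_, ?_, ?_⟩
    · intro v hv
      have hvw : v ≠ w := fun h => hv (h ▸ List.mem_cons_self)
      have hvws : v ∉ ws := fun h => hv (List.mem_cons_of_mem _ h)
      have := Hout v hvws
      exact ⟨this.1.trans (hbad1v v hvw), this.2.trans (hnonq1v v hvw)⟩
    · intro v hv hbv hqv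
      rcases List.mem_cons.mp hv with hv | hv
      · subst hv
        have := Hout v hnotin
        exact ⟨this.1.trans (hcorrw hbv hqv).1, this.2.trans (hcorrw hbv hqv).2⟩
      · have hvw : v ≠ w := fun h => hnotin (h ▸ hv)
        exact Hin v hv ((hbad1v v hvw).trans hbv) ((hnonq1v v hvw).trans hqv)
    · intro x hx
      exact HM x (hheap1sub x hx)
    · intro hs
      apply HS
      rw [hheap1]
      split_ifs
      · exact List.Pairwise.orderedInsert w heap hs
      · exact hs
    · intro x hx
      rcases HP x hx with h | h
      · rcases hheap1mem x h with h2 | h2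
        · exact Or.inl h2
        · exact Or.inr (h2 ▸ List.mem_cons_self)
      · exact Or.inr (List.mem_cons_of_mem _ h)
    · intro v hv hbv hqv hEv
      rcases List.mem_cons.mp hv with hv | hv
      · subst hv
        have hcw := hcorrw hbv hqv
        have hcond : (bad1.getD v 0 == 0 && decide (0 < nonq1.getD v 0)) = true := by
          rw [hcw.1, hcw.2]
          simp [hEv.1, hEv.2]
        apply HM
        rw [hheap1, if_pos hcond]
        exact (List.mem_orderedInsert _).mpr (Or.inl rfl)
      · have hvw : v ≠ w := fun h => hnotin (h ▸ hv)
        exact HE v hv ((hbad1v v hvw).trans hbv) ((hnonq1v v hvw).trans hqv) hEv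

theorem mem_ws_iff (n limit p w : Nat) (hlim : 0 < limit) :
    w ∈ List.range' (if n ≤ p+1 then p+1-n else 0)
          ((if p < limit-1 then p else limit-1) + 1 - (if n ≤ p+1 then p+1-n else 0)) ↔
      (w ≤ p ∧ p < w + n ∧ w < limit) := by
  rw [List.mem_range'_1]
  split_ifs <;> omega

theorem updP_spec (stamp t : List Char) (n limit i : Nat)
    (hlen : ∀ w, w < limit → w + n ≤ t.length) (hiw : i < limit) :
    ∀ (cnt p : Nat), p + cnt = i + n → i ≤ p →
    ∀ (s : List Char) (bad nonq heap : List Nat) (remaining : Nat),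
      s = clearTo t i p →
      bad.length = limit → nonq.length = limit →
      (∀ v, v < limit → bad.getD v 0 = badC stamp s n v ∧ nonq.getD v 0 = qC s n v) →
      List.Pairwise (· ≤ ·) heap → (∀ x ∈ heap, x < limit) →
      (∀ v, v < limit → Elig stamp s n v →
        v ∈ heap ∨ (v = i ∧ ∃ q, p ≤ q ∧ q < i + n ∧ t.getD q '?' ≠ '?')) →
      remaining = s.countP (fun c => c != '?') →
      (pvUpdP stamp n limit (List.range' p cnt) (s, bad, nonq, heap, remaining)).1 =
        clearTo t i (i+n) ∧
      (pvUpdP stamp n limit (List.range' p cnt) (s, bad, nonq, heap, remaining)).2.1.length = limit ∧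
      (pvUpdP stamp n limit (List.range' p cnt) (s, bad, nonq, heap, remaining)).2.2.1.length = limit ∧
      (∀ v, v < limit →
        (pvUpdP stamp n limit (List.range' p cnt) (s, bad, nonq, heap, remaining)).2.1.getD v 0 =
          badC stamp (clearTo t i (i+n)) n v ∧
        (pvUpdP stamp n limit (List.range' p cnt) (s, bad, nonq, heap, remaining)).2.2.1.getD v 0 =
          qC (clearTo t i (i+n)) n v) ∧
      List.Pairwise (· ≤ ·)
        (pvUpdP stamp n limit (List.range' p cnt) (s, bad, nonq, heap, remaining)).2.2.2.1 ∧
      (∀ x ∈ (pvUpdP stamp n limit (List.range' p cnt) (s, bad, nonq, heap, remaining)).2.2.2.1,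
        x < limit) ∧
      (∀ v, v < limit → Elig stamp (clearTo t i (i+n)) n v →
        v ∈ (pvUpdP stamp n limit (List.range' p cnt) (s, bad, nonq, heap, remaining)).2.2.2.1) ∧
      (pvUpdP stamp n limit (List.range' p cnt) (s, bad, nonq, heap, remaining)).2.2.2.2 =
        (clearTo t i (i+n)).countP (fun c => c != '?') := by
  intro cnt
  induction cnt with
  | zero =>
    intro p hpc hip s bad nonq heap remaining hs hbl hql hcnt hsort hbnd hcont hrem
    have hpe : p = i + n := by omega
    subst hpe
    subst hs
    refine ⟨rfl, hbl, hql, hcnt, hsort, hbnd, ?_, hrem⟩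
    intro v hv hE
    rcases hcont v hv hE with h | ⟨_, q, hq1, hq2, _⟩
    · exact h
    · omega
  | succ cnt ih =>
    intro p hpc hip s bad nonq heap remaining hs hbl hql hcnt hsort hbnd hcont hrem
    have hlim : 0 < limit := by omega
    have hpn : p < i + n := by omega
    have htlen : i + n ≤ t.length := hlen i hiw
    have hplen : p < t.length := by omega
    have hslen : s.length = t.length := by rw [hs]; exact clearTo_length t i p hip (by omega)
    have hsp : s.getD p '?' = t.getD p '?' := by
      rw [hs, clearTo_getD t i p p hip (by omega), if_neg (by omega)]
    rw [List.range'_succ]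
    by_cases hcq : s.getD p '?' = '?'
    · -- position p is already '?': the loop body does nothing
      have hcb : (s.getD p '?' != '?') = false := by simpa using hcq
      have hstep : pvUpdP stamp n limit (p :: List.range' (p+1) cnt)
            (s, bad, nonq, heap, remaining) =
          pvUpdP stamp n limit (List.range' (p+1) cnt) (s, bad, nonq, heap, remaining) := by
        simp only [pvUpdP, hcb, Bool.false_eq_true, if_false]
      rw [hstep]
      have hskip : clearTo t i p = clearTo t i (p+1) :=
        clearTo_skip t i p hip hplen (by rw [← hsp, hcq])
      exact ih (p+1) (by omega) (by omega) s bad nonq heap remaining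
        (by rw [hs, hskip]) hbl hql hcnt hsort hbnd
        (fun v hv hE => by
          rcases hcont v hv hE with h | ⟨hvi, q, hq1, hq2, hq3⟩
          · exact Or.inl h
          · refine Or.inr ⟨hvi, q, ?_, hq2, hq3⟩
            rcases Nat.eq_or_lt_of_le hq1 with h1 | h1
            · exact absurd (show t.getD q '?' = '?' by rw [← h1, ← hsp, hcq]) hq3
            · omega)
        hrem
    · -- position p is cleared and the ≤ n windows that contain it are updated
      have hcb : (s.getD p '?' != '?') = true := by simpa using hcq
      have hset : s.set p '?' = clearTo t i (p+1) := by
        rw [hs]; exact clearTo_set t i p hip hplen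
      obtain ⟨W1, W2, Wout, Win, WM, WS, WP, WE⟩ :=
        updW_spec stamp s n limit p (by omega) hcq
          (List.range' (if n ≤ p+1 then p+1-n else 0)
            ((if p < limit-1 then p else limit-1) + 1 - (if n ≤ p+1 then p+1-n else 0)))
          bad nonq heap hbl hql
          (fun w hw => (mem_ws_iff n limit p w hlim).mp hw) List.nodup_range'
      set ws := List.range' (if n ≤ p+1 then p+1-n else 0)
        ((if p < limit-1 then p else limit-1) + 1 - (if n ≤ p+1 then p+1-n else 0)) with hws
      set r := pvUpdW stamp (s.getD p '?') p ws (bad, nonq, heap) with hr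
      have hstep : pvUpdP stamp n limit (p :: List.range' (p+1) cnt)
            (s, bad, nonq, heap, remaining) =
          pvUpdP stamp n limit (List.range' (p+1) cnt)
            (s.set p '?', r.1, r.2.1, r.2.2, remaining - 1) := by
        simp only [pvUpdP, hcb, if_true, hws, hr]
      rw [hstep]
      -- window counters outside ws are untouched by the set
      have hcongr : ∀ v, v < limit → v ∉ ws →
          (∀ j, j < n → (s.set p '?').getD (v+j) '?' = s.getD (v+j) '?') := by
        intro v hv hvws
        have hnc : ¬ (v ≤ p ∧ p < v + n) := by
          intro hcnd
          exact hvws ((mem_ws_iff n limit p v hlim).mpr ⟨hcnd.1, hcnd.2, hv⟩)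
        exact getD_set_out s p n v hnc
      have hiws : i ∈ ws := (mem_ws_iff n limit p i hlim).mpr ⟨hip, hpn, hiw⟩
      exact ih (p+1) (by omega) (by omega) (s.set p '?') r.1 r.2.1 r.2.2 (remaining - 1)
        hset W1 W2
        (fun v hv => by
          by_cases hvws : v ∈ ws
          · exact Win v hvws (hcnt v hv).1 (hcnt v hv).2
          · have hWout := Wout v hvws
            have hbc : badC stamp (s.set p '?') n v = badC stamp s n v :=
              badC_congr stamp _ s n v (hcongr v hv hvws)
            have hqc : qC (s.set p '?') n v = qC s n v :=
              qC_congr _ s n v (hcongr v hv hvws)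
            exact ⟨by rw [hWout.1, (hcnt v hv).1, hbc],
                   by rw [hWout.2, (hcnt v hv).2, hqc]⟩)
        (WS hsort)
        (fun x hx => by
          rcases WP x hx with h | h
          · exact hbnd x h
          · exact ((mem_ws_iff n limit p x hlim).mp (hws ▸ h)).2.2)
        (fun v hv hE => by
          by_cases hvws : v ∈ ws
          · exact Or.inl (WE v hvws (hcnt v hv).1 (hcnt v hv).2 hE)
          · have hEs : Elig stamp s n v :=
              (elig_congr stamp _ s n v (hcongr v hv hvws)).mp hE
            rcases hcont v hv hEs with h | ⟨hvi, _⟩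
            · exact Or.inl (WM v h)
            · exact absurd (hvi ▸ hiws) hvws)
        (by rw [countP_set_clear s p (by omega) hcq, hrem])

-- --- A-side window characterisations (via the slice picture) ---

theorem window_map (t : List Char) (i n : Nat) (h : i + n ≤ t.length) :
    (t.drop i).take n = (List.range n).map (fun j => t.getD (i+j) '?') := by
  apply List.ext_getElem
  · simp; omega
  · intro j h1 h2
    have hij : i + j < t.length := by simp at h1; omega
    simp [List.getElem_take, List.getElem_drop, List.getD_eq_getElem?_getD,
      List.getElem?_eq_getElem hij]

theorem allQ_iff (t : List Char) (i n : Nat) (h : i + n ≤ t.length) :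
    (((t.drop i).take n).all (fun c => c == '?') = true) ↔ qC t n i = 0 := by
  rw [window_map t i n h, qC_zero_iff]
  simp [List.all_eq_true]

theorem zip_truncate {α β : Type} : ∀ (l1 : List α) (l2 : List β), l1.zip l2 = l1.zip (l2.take l1.length)
  | [], _ => by simp
  | _ :: _, [] => by simp
  | a :: l1, b :: l2 => by simp [List.zip_cons_cons, zip_truncate l1 l2]

theorem zipMatch_iff (stamp t : List Char) (i n : Nat) (h : i + n ≤ t.length)
    (hn : stamp.length = n) :
    ((stamp.zip (t.drop i)).all (fun ab => ab.1 == ab.2 || ab.2 == '?') = true) ↔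
      badC stamp t n i = 0 := by
  rw [badC_zero_iff]
  rw [zip_truncate, hn, window_map t i n h]
  have hs : stamp = (List.range n).map (fun j => stamp.getD j '?') := by
    have := window_map stamp 0 n (by simp [hn])
    rw [List.drop_zero, ← hn, List.take_length] at this
    simpa [hn] using this
  conv_lhs => rw [hs]
  rw [List.zip_map']
  simp only [List.all_eq_true, List.mem_map, List.mem_range]
  constructor
  · rintro hall j hj
    have := hall _ ⟨j, hj, rfl⟩
    simp only [beq_iff_eq, Bool.or_eq_true] at this
    tauto
  · rintro hall x ⟨j, hj, rfl⟩
    simp only [beq_iff_eq, Bool.or_eq_true]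
    rcases hall j hj with h | h
    · exact Or.inr (by simpa using h)
    · exact Or.inl (by simpa using h.symm)

-- --- A's matchstring ---

theorem matchAt_neg (stamp t : List Char) (n : Nat) (hn : stamp.length = n) :
    ∀ (b a : Nat), (∀ e, a ≤ e → e < a + b → e + n ≤ t.length) →
      (∀ e, a ≤ e → e < a + b → ¬ Elig stamp t n e) →
      pvMatchAt stamp t n (List.range' a b) = -1 := by
  intro b
  induction b with
  | zero => intro a _ _; rfl
  | succ b ih =>
    intro a hbound hne
    have hlen : a + n ≤ t.length := hbound a (le_refl a) (by omega)
    rw [List.range'_succ]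
    simp only [pvMatchAt]
    by_cases hq : ((t.drop a).take n).all (fun c => c == '?') = true
    · rw [if_pos hq]
      exact ih (a+1) (fun e h1 h2 => hbound e (by omega) (by omega))
        (fun e h1 h2 => hne e (by omega) (by omega))
    · rw [if_neg hq]
      have hqpos : 0 < qC t n a := by
        rcases Nat.eq_zero_or_pos (qC t n a) with h0 | h0
        · exact absurd ((allQ_iff t a n hlen).mpr h0) hq
        · exact h0
      have hbad : badC stamp t n a ≠ 0 :=
        fun h0 => hne a (le_refl a) (by omega) ⟨h0, hqpos⟩
      have hzip : ¬ ((stamp.zip (t.drop a)).all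
          (fun ab => ab.1 == ab.2 || ab.2 == '?') = true) :=
        fun hz => hbad ((zipMatch_iff stamp t a n hlen hn).mp hz)
      rw [if_neg hzip]
      exact ih (a+1) (fun e h1 h2 => hbound e (by omega) (by omega))
        (fun e h1 h2 => hne e (by omega) (by omega))

theorem matchAt_pos (stamp t : List Char) (n : Nat) (hn : stamp.length = n) :
    ∀ (b a i : Nat), (∀ e, a ≤ e → e < a + b → e + n ≤ t.length) →
      a ≤ i → i < a + b → Elig stamp t n i →
      (∀ e, a ≤ e → e < i → ¬ Elig stamp t n e) →
      pvMatchAt stamp t n (List.range' a b) = (i : Int) := by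
  intro b
  induction b with
  | zero => intro a i _ hai hib _ _; exact ((by omega : False)).elim
  | succ b ih =>
    intro a i hbound hai hib hE hmin
    have hlen : a + n ≤ t.length := hbound a (le_refl a) (by omega)
    rw [List.range'_succ]
    simp only [pvMatchAt]
    by_cases hae : a = i
    · subst hae
      have hq : ¬ (((t.drop a).take n).all (fun c => c == '?') = true) := by
        intro hz
        have h0 := (allQ_iff t a n hlen).mp hz
        have h2 := hE.2
        omega
      rw [if_neg hq, if_pos ((zipMatch_iff stamp t a n hlen hn).mpr hE.1)]
    · have hnE : ¬ Elig stamp t n a := hmin a (le_refl a) (by omega)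
      by_cases hq : ((t.drop a).take n).all (fun c => c == '?') = true
      · rw [if_pos hq]
        exact ih (a+1) i (fun e h1 h2 => hbound e (by omega) (by omega)) (by omega) (by omega)
          hE (fun e h1 h2 => hmin e (by omega) h2)
      · rw [if_neg hq]
        have hqpos : 0 < qC t n a := by
          rcases Nat.eq_zero_or_pos (qC t n a) with h0 | h0
          · exact absurd ((allQ_iff t a n hlen).mpr h0) hq
          · exact h0
        have hbad : badC stamp t n a ≠ 0 := fun h0 => hnE ⟨h0, hqpos⟩
        have hzip : ¬ ((stamp.zip (t.drop a)).all
            (fun ab => ab.1 == ab.2 || ab.2 == '?') = true) :=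
          fun hz => hbad ((zipMatch_iff stamp t a n hlen hn).mp hz)
        rw [if_neg hzip]
        exact ih (a+1) i (fun e h1 h2 => hbound e (by omega) (by omega)) (by omega) (by omega)
          hE (fun e h1 h2 => hmin e (by omega) h2)

theorem rangeA_eq (m n : Nat) :
    pvRangeA m n = List.range' 0 (if n ≤ m then m - n + 1 else 0) := by
  unfold pvRangeA
  split_ifs with h
  · rw [List.range_eq_range']
  · rfl

-- --- A's stamped string vs clearTo, counts ---

theorem clearTo_full (t : List Char) (i n : Nat) :
    clearTo t i (i+n) = t.take i ++ List.replicate n '?' ++ t.drop (i+n) := by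
  simp [clearTo]

theorem count_pos_iff (t : List Char) :
    (t.any (fun c => c != '?') = true) ↔ 0 < t.countP (fun c => c != '?') := by
  rw [List.countP_pos_iff, List.any_eq_true]

-- --- the two loops run in lockstep ---

theorem loops_eq (stamp : List Char) (m n : Nat) (hn : stamp.length = n) :
    ∀ (f : Nat) (t : List Char) (bad nonq heap : List Nat) (remaining : Nat) (res : List Int),
      t.length = m →
      bad.length = (if n ≤ m then m - n + 1 else 0) →
      nonq.length = (if n ≤ m then m - n + 1 else 0) →
      (∀ v, v < (if n ≤ m then m - n + 1 else 0) →
        bad.getD v 0 = badC stamp t n v ∧ nonq.getD v 0 = qC t n v) →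
      List.Pairwise (· ≤ ·) heap →
      (∀ x ∈ heap, x < (if n ≤ m then m - n + 1 else 0)) →
      (∀ v, v < (if n ≤ m then m - n + 1 else 0) → Elig stamp t n v → v ∈ heap) →
      remaining = t.countP (fun c => c != '?') →
      movesToStampLoop stamp m n f t res =
        pvAltLoop stamp n (if n ≤ m then m - n + 1 else 0) f t bad nonq heap remaining res := by
  intro f
  induction f with
  | zero => intro t bad nonq heap remaining res _ _ _ _ _ _ _ _; rfl
  | succ f ih =>
    intro t bad nonq heap remaining res hlen hbl hql hcnt hsort hbnd hcont hrem
    have hbound : ∀ idx, idx < (if n ≤ m then m - n + 1 else 0) → idx + n ≤ t.length := by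
      intro idx hidx
      rw [hlen]
      by_cases h : n ≤ m
      · rw [if_pos h] at hidx; omega
      · rw [if_neg h] at hidx; omega
    simp only [movesToStampLoop, pvAltLoop]
    by_cases hpos : 0 < remaining
    · have hanyT : (t.any (fun c => c != '?')) = true :=
        (count_pos_iff t).mpr (hrem ▸ hpos)
      rw [if_pos hanyT, if_pos hpos]
      obtain ⟨Pnone, Psome⟩ := pop_spec stamp t n (if n ≤ m then m - n + 1 else 0) bad nonq
        (fun v hv => (hcnt v hv).1) (fun v hv => (hcnt v hv).2) heap hsort hbnd hcont
      cases hpop : pvPop bad nonq heap with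
      | none =>
        have hm1 : pvMatchAt stamp t n (pvRangeA m n) = -1 := by
          rw [rangeA_eq]
          exact matchAt_neg stamp t n hn _ 0 (fun e h1 h2 => hbound e (by omega))
            (fun e h1 h2 => Pnone hpop e (by omega))
        rw [hm1]
        simp
      | some ir =>
        obtain ⟨i, rest⟩ := ir
        obtain ⟨hiL, hiE, hmin, hrest, hsrt2, hbd2⟩ := Psome i rest hpop
        have hmi : pvMatchAt stamp t n (pvRangeA m n) = (i : Int) := by
          rw [rangeA_eq]
          refine matchAt_pos stamp t n hn _ 0 i (fun e h1 h2 => hbound e (by omega))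
            (by omega) (by omega) hiE ?_
          intro e h1 h2 hEe
          have := hmin e (by omega) hEe
          omega
        have hne : (((i : Int)) == (-1 : Int)) = false := by
          simp only [beq_eq_false_iff_ne, ne_eq]
          omega
        rw [hmi]
        simp only [hne, Bool.false_eq_true, if_false, Int.toNat_natCast]
        -- run the update lemma on the stamping of window i
        obtain ⟨S1, SL1, SL2, Scnt, Ssort, Sbnd, Scont, Srem⟩ :=
          updP_spec stamp t n (if n ≤ m then m - n + 1 else 0) i hbound hiL n i
            (by omega) (le_refl i) t bad nonq rest remaining (clearTo_self t i).symm
            hbl hql hcnt hsrt2 hbd2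
            (fun v hv hE => by
              by_cases hvi : v = i
              · subst hvi
                obtain ⟨j, hj, hjq⟩ := (qC_pos_iff t n v).mp hE.2
                exact Or.inr ⟨rfl, v + j, by omega, by omega, hjq⟩
              · exact Or.inl (hrest v hv hE hvi))
            hrem
        have hstamped : t.take i ++ List.replicate n '?' ++ t.drop (i + n) =
            clearTo t i (i+n) := (clearTo_full t i n).symm
        rw [hstamped, ← S1]
        exact ih _ _ _ _ _ (res ++ [(i : Int)])
          (by rw [S1, clearTo_length t i (i+n) (by omega) (hbound i hiL), hlen])
          SL1 SL2 (fun v hv => by rw [S1]; exact Scnt v hv) Ssort Sbnd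
          (fun v hv hE => Scont v hv (S1 ▸ hE)) (by rw [S1]; exact Srem)
    · have hanyF : (t.any (fun c => c != '?')) = false := by
        rcases Bool.eq_false_or_eq_true (t.any (fun c => c != '?')) with h1 | h1
        · exact absurd (hrem ▸ (count_pos_iff t).mp h1) hpos
        · exact h1
      rw [hanyF, if_neg hpos]
      simp

-- ===== VERDICT (by name: the statement is the Claim_ definition above) =====
theorem movesToStamp_spec : Claim_equal_movesToStamp := by
  intro stamp target _
  unfold Spec_movesToStamp movesToStamp movesToStamp_alt
  obtain ⟨L1, L2, Hin, _, HS, HB, _, HE⟩ :=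
    init_spec stamp.toList target.toList stamp.length
      (if stamp.length ≤ target.length then target.length - stamp.length + 1 else 0)
      (List.range (if stamp.length ≤ target.length then target.length - stamp.length + 1 else 0))
      (List.replicate (if stamp.length ≤ target.length then target.length - stamp.length + 1 else 0) 0)
      (List.replicate (if stamp.length ≤ target.length then target.length - stamp.length + 1 else 0) 0)
      [] (by simp) (by simp) (fun w hw => List.mem_range.mp hw) (List.nodup_range)
      List.Pairwise.nil (by simp)
  exact loops_eq stamp.toList target.length stamp.length rfl (target.length + 1)
    target.toList _ _ _ _ [] rfl L1 L2
    (fun v hv => Hin v (List.mem_range.mpr hv)) HS HB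
    (fun v hv hE => HE v (List.mem_range.mpr hv) hE) rfl
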